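-- pv_equiv track=rewrite | github.com/viditworks1/indian-text-utils | indian_text_utils/address_parser_utils.py | join_if_short
-- ===== SOURCE A (Python) =====
-- def join_if_short(parts, max_length=3):
--     merged = []
--     buffer = ''
--     for p in parts:
--         if len(p) <= max_length:
--             buffer += (p + ' ')
--         else:
--             if buffer:
--                 merged.append(buffer.strip())
--                 buffer = ''
--             merged.append(p)
--     if buffer:
--         merged.append(buffer.strip())
--     return merged
-- ===== SOURCE B (Python) =====
-- def join_if_short(parts, max_length=3):
--     # Run-based rewrite: split parts into maximal consecutive runs of short
--     # parts and emit each run as one joined element; long parts pass through.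
--     merged = []
--     i = 0
--     n = len(parts)
--     while i < n:
--         if len(parts[i]) <= max_length:
--             j = i + 1
--             while j < n and len(parts[j]) <= max_length:
--                 j += 1
--             merged.append(' '.join(parts[i:j]).strip())
--             i = j
--         else:
--             merged.append(parts[i])
--             i += 1
--     return merged
-- ===== Notes on version B (the rewrite author's own statement) =====
-- stated objective: alternative
-- what changed: Replaces A's buffer/flush state machine with a run-based two-pointer scan: each maximal consecutive run of short parts is emitted as ' '.join(run).strip() in one step, long parts pass through individually.
import Mathlib
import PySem

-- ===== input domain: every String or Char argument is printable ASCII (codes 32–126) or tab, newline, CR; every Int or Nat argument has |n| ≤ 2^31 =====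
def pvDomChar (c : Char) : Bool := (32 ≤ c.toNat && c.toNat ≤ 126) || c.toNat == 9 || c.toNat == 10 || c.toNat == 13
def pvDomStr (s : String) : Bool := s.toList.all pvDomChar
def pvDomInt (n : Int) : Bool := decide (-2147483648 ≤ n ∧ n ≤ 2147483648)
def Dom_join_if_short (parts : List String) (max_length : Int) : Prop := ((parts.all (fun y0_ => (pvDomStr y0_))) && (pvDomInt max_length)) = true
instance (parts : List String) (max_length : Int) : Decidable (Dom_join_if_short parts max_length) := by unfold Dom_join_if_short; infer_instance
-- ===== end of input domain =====

-- B replaces A's buffer/flush state machine with a run-based scan (maximal runs of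
-- short parts joined in one step); alternative decomposition, same cost; return values proved equal.


-- ===== PORT A =====
def join_if_short (parts : List String) (max_length : Int) : List String :=
  let st := parts.foldl (fun (st : List String × String) p =>
      if PySem.Str.len p ≤ max_length then
        (st.1, st.2 ++ (p ++ " "))
      else if st.2 ≠ "" then
        (st.1 ++ [PySem.Str.strip st.2] ++ [p], "")
      else
        (st.1 ++ [p], st.2))
    ([], "")
  if st.2 ≠ "" then st.1 ++ [PySem.Str.strip st.2] else st.1

-- ===== PORT B =====
-- the outer while loop of Source B; from a short part at i the inner while advances j
-- over the following short parts, i.e. takeWhile/dropWhile on the tail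
def join_if_short_go (max_length : Int) : List String → List String
  | [] => []
  | p :: rest =>
    if PySem.Str.len p ≤ max_length then
      PySem.Str.strip (PySem.Str.join " " (p :: rest.takeWhile (fun q => decide (PySem.Str.len q ≤ max_length))))
        :: join_if_short_go max_length (rest.dropWhile (fun q => decide (PySem.Str.len q ≤ max_length)))
    else
      p :: join_if_short_go max_length rest
termination_by l => l.length
decreasing_by
  · exact Nat.lt_succ_of_le (List.length_dropWhile_le _ _)
  · simp

def join_if_short_alt (parts : List String) (max_length : Int) : List String :=
  join_if_short_go max_length parts

-- ===== PRECONDITION & SPEC =====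
def Spec_join_if_short (parts : List String) (max_length : Int) (out : List String) : Prop := out = join_if_short_alt parts max_length
instance (parts : List String) (max_length : Int) (out : List String) : Decidable (Spec_join_if_short parts max_length out) := by unfold Spec_join_if_short; infer_instance

-- ===== CLAIM (what is proved, stated in full; the proofs are below) =====
def Claim_equal_join_if_short : Prop := ∀ (parts : List String) (max_length : Int), Dom_join_if_short parts max_length → Spec_join_if_short parts max_length (join_if_short parts max_length)

-- ===== LEMMAS AND PROOFS =====

-- A's loop body and final flush, named for the proofs
def stepA (m : Int) : List String × String → String → List String × String :=
  fun st p =>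
    if PySem.Str.len p ≤ m then
      (st.1, st.2 ++ (p ++ " "))
    else if st.2 ≠ "" then
      (st.1 ++ [PySem.Str.strip st.2] ++ [p], "")
    else
      (st.1 ++ [p], st.2)

def finishA (st : List String × String) : List String :=
  if st.2 ≠ "" then st.1 ++ [PySem.Str.strip st.2] else st.1

lemma join_if_short_eq (parts : List String) (m : Int) :
    join_if_short parts m = finishA (parts.foldl (stepA m) ([], "")) := rfl

-- folding A's step over a run of short parts only grows the buffer
lemma fold_run (m : Int) : ∀ (run : List String) (merged : List String) (b : String),
    (∀ q ∈ run, PySem.Str.len q ≤ m) →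
    run.foldl (stepA m) (merged, b) = (merged, run.foldl (fun b p => b ++ (p ++ " ")) b) := by
  intro run
  induction run with
  | nil => intro merged b _; rfl
  | cons p rest ih =>
    intro merged b h
    have hp : PySem.Str.len p ≤ m := h p (by simp)
    simp only [List.foldl_cons, stepA, if_pos hp]
    exact ih merged _ (fun q hq => h q (by simp [hq]))

lemma buf_toList : ∀ (run : List String) (b : String),
    (run.foldl (fun b p => b ++ (p ++ " ")) b).toList
      = b.toList ++ (run.map (fun p => p.toList ++ [' '])).flatten := by
  intro run
  induction run with
  | nil => intro b; simp
  | cons p rest ih =>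
    intro b
    simp [List.foldl_cons, ih]

lemma flatten_space (sp : Char) : ∀ (cs : List (List Char)), cs ≠ [] →
    (cs.map (fun p => p ++ [sp])).flatten = PySem.Chars.join [sp] cs ++ [sp] := by
  intro cs
  induction cs with
  | nil => intro h; exact absurd rfl h
  | cons x rest ih =>
    intro _
    cases rest with
    | nil => simp [PySem.Chars.join_singleton]
    | cons y t =>
      have := ih (by simp)
      simp only [List.map_cons, List.flatten_cons] at this ⊢
      rw [this, PySem.Chars.join_cons_cons]
      simp

lemma dropWhile_head_false {α : Type} (p : α → Bool) : ∀ (l : List α) (q : α) (t : List α),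
    l.dropWhile p = q :: t → p q = false := by
  intro l
  induction l with
  | nil => intro q t h; simp at h
  | cons x xs ih =>
    intro q t h
    by_cases hx : p x
    · rw [List.dropWhile_cons_of_pos hx] at h; exact ih q t h
    · rw [List.dropWhile_cons_of_neg hx] at h
      cases h; simpa using hx

lemma rstrip_append_space (z : List Char) :
    PySem.Chars.rstrip (z ++ [' ']) = PySem.Chars.rstrip z := by
  simp [PySem.Chars.rstrip, PySem.Chars.isspace]

lemma strip_append_space (x : List Char) :
    PySem.Chars.strip (x ++ [' ']) = PySem.Chars.strip x := by
  simp only [PySem.Chars.strip, PySem.Chars.lstrip, List.dropWhile_append]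
  by_cases h : (x.dropWhile PySem.Chars.isspace).isEmpty
  · simp [List.isEmpty_iff.mp h, PySem.Chars.isspace, PySem.Chars.rstrip]
  · simp [h, rstrip_append_space]

-- buffer accumulated over a nonempty run: its toList is join ++ [' ']
lemma buf_toList_join (run : List String) (h : run ≠ []) :
    ((run.foldl (fun b p => b ++ (p ++ " ")) "").toList)
      = PySem.Chars.join [' '] (run.map String.toList) ++ [' '] := by
  rw [buf_toList]
  have hne : run.map String.toList ≠ [] := by simpa using h
  have := flatten_space ' ' (run.map String.toList) hne
  simpa [List.map_map, Function.comp] using this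

lemma buf_ne (run : List String) (h : run ≠ []) :
    (run.foldl (fun b p => b ++ (p ++ " ")) "") ≠ "" := by
  intro heq
  have h2 : ((run.foldl (fun b p => b ++ (p ++ " ")) "").toList) = [] := by rw [heq]; rfl
  rw [buf_toList_join run h] at h2
  simp at h2

lemma strip_buf (run : List String) (h : run ≠ []) :
    PySem.Str.strip (run.foldl (fun b p => b ++ (p ++ " ")) "")
      = PySem.Str.strip (PySem.Str.join " " run) := by
  show String.ofList _ = String.ofList _
  congr 1
  rw [buf_toList_join run h, strip_append_space, PySem.Str.toList_join]
  rfl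

lemma main_lemma (m : Int) : ∀ (n : Nat) (parts : List String), parts.length ≤ n →
    ∀ merged : List String,
      finishA (parts.foldl (stepA m) (merged, "")) = merged ++ join_if_short_go m parts := by
  intro n
  induction n with
  | zero =>
    intro parts hlen merged
    have h0 : parts = [] := List.length_eq_zero_iff.mp (Nat.le_zero.mp hlen)
    subst h0
    simp [finishA, join_if_short_go]
  | succ n ih =>
    intro parts hlen merged
    match parts with
    | [] => simp [finishA, join_if_short_go]
    | p :: rest =>
      by_cases hp : PySem.Str.len p ≤ m
      · -- short head: the maximal run is p :: rest.takeWhile, the rest is rest.dropWhile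
        have hrunne : p :: rest.takeWhile (fun q => decide (PySem.Str.len q ≤ m)) ≠ [] := by simp
        have hshort : ∀ q ∈ p :: rest.takeWhile (fun q => decide (PySem.Str.len q ≤ m)),
            PySem.Str.len q ≤ m := by
          intro q hq
          rcases List.mem_cons.mp hq with h | h
          · subst h; exact hp
          · exact of_decide_eq_true (List.mem_takeWhile_imp (p := fun q => decide (PySem.Str.len q ≤ m)) h)
        have hfold : (p :: rest).foldl (stepA m) (merged, "")
            = (rest.dropWhile (fun q => decide (PySem.Str.len q ≤ m))).foldl (stepA m)
                (merged, (p :: rest.takeWhile (fun q => decide (PySem.Str.len q ≤ m))).foldl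
                  (fun b p => b ++ (p ++ " ")) "") := by
          conv_lhs =>
            rw [show p :: rest
                = (p :: rest.takeWhile (fun q => decide (PySem.Str.len q ≤ m)))
                    ++ rest.dropWhile (fun q => decide (PySem.Str.len q ≤ m)) by
              simp [List.takeWhile_append_dropWhile]]
          rw [List.foldl_append, fold_run m _ merged "" hshort]
        have hBne := buf_ne _ hrunne
        have hgo : join_if_short_go m (p :: rest)
            = PySem.Str.strip (PySem.Str.join " "
                (p :: rest.takeWhile (fun q => decide (PySem.Str.len q ≤ m))))
              :: join_if_short_go m (rest.dropWhile (fun q => decide (PySem.Str.len q ≤ m))) := by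
          rw [join_if_short_go, if_pos hp]
        rcases hdw : rest.dropWhile (fun q => decide (PySem.Str.len q ≤ m)) with _ | ⟨q, rest''⟩
        · rw [hfold, hgo, hdw]
          simp only [List.foldl_nil, finishA, if_pos hBne]
          rw [strip_buf _ hrunne]
          simp [join_if_short_go]
        · have hq : ¬ PySem.Str.len q ≤ m :=
            of_decide_eq_false (dropWhile_head_false _ rest q rest'' hdw)
          have hlen'' : rest''.length ≤ n := by
            have h1 := List.length_dropWhile_le (fun q => decide (PySem.Str.len q ≤ m)) rest
            rw [hdw] at h1
            simp only [List.length_cons] at h1 hlen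
            omega
          rw [hfold, hgo, hdw, List.foldl_cons]
          have hstep : stepA m (merged, (p :: rest.takeWhile
                (fun q => decide (PySem.Str.len q ≤ m))).foldl (fun b p => b ++ (p ++ " ")) "") q
              = (merged ++ [PySem.Str.strip ((p :: rest.takeWhile
                  (fun q => decide (PySem.Str.len q ≤ m))).foldl (fun b p => b ++ (p ++ " ")) "")]
                  ++ [q], "") := by
            simp only [stepA]
            rw [if_neg hq, if_pos hBne]
          rw [hstep, ih rest'' hlen'']
          rw [join_if_short_go, if_neg hq, strip_buf _ hrunne]
          simp
      · -- long head: flush is a no-op (buffer empty), p passes through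
        have hstep : stepA m (merged, "") p = (merged ++ [p], "") := by
          simp only [stepA]
          rw [if_neg hp]
          simp
        rw [List.foldl_cons, hstep, ih rest (Nat.le_of_succ_le_succ hlen) (merged ++ [p])]
        rw [join_if_short_go, if_neg hp]
        simp

-- ===== VERDICT (by name: the statement is the Claim_ definition above) =====
theorem join_if_short_spec : Claim_equal_join_if_short := by
  intro parts m _
  show join_if_short parts m = join_if_short_alt parts m
  rw [join_if_short_eq, join_if_short_alt]
  simpa using main_lemma m parts.length parts (le_refl _) []
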